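-- pv_equiv track=rewrite | github.com/virgulilla/romanos | calculatum/roman_functions.py | to_components
-- ===== SOURCE A (Python) =====
-- def to_components(roman: str) -> list:
--     order = 0
--     number = ""
--     numbers = []
--     for car in roman:
--         if car != "*":
--             if order > 0:
--                 numbers.append((number, order))
--                 order = 0
--                 number = ""
--             number += car
--         else:
--             order += 1
--     numbers.append((number, order))
--     return numbers
-- ===== SOURCE B (Python) =====
-- def to_components(roman: str) -> list:
--     # Two-pointer segment scan over indices: each piece is a run of non-stars
--     # followed by its run of stars; emit (letters, star-count) per piece.
--     out = []
--     n = len(roman)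
--     i = 0
--     while True:
--         j = i
--         while j < n and roman[j] != '*':
--             j += 1
--         k = j
--         while k < n and roman[k] == '*':
--             k += 1
--         out.append((roman[i:j], k - j))
--         if k == n:
--             return out
--         i = k
-- ===== Notes on version B (the rewrite author's own statement) =====
-- stated objective: alternative
-- what changed: Replaced A's character-by-character state machine (order/number accumulators flushed on a non-star after stars) with a two-pointer segment scan that slices out each letters-run and counts its star-run by index arithmetic.
import Mathlib
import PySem

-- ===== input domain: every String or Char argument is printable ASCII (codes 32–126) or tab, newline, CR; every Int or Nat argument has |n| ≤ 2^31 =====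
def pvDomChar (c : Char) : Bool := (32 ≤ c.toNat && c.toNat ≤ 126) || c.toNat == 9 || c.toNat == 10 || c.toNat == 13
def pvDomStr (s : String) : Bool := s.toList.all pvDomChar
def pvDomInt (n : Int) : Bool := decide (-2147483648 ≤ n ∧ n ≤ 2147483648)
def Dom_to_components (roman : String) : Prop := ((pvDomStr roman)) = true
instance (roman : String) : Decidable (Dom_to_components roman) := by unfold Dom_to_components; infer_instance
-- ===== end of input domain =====

-- B replaces A's char-by-char state machine by a two-pointer segment scan (alternative decomposition, same cost).

-- ===== PORT A =====
-- one iteration of A's for-loop, state = (order, number as chars, numbers)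
def toCompStep (st : Int × List Char × List (String × Int)) (car : Char) :
    Int × List Char × List (String × Int) :=
  if car != '*' then
    if st.1 > 0 then (0, [car], st.2.2 ++ [(String.mk st.2.1, st.1)])
    else (st.1, st.2.1 ++ [car], st.2.2)
  else (st.1 + 1, st.2.1, st.2.2)

def to_components (roman : String) : List (String × Int) :=
  let s := roman.toList.foldl toCompStep (0, [], [])
  s.2.2 ++ [(String.mk s.2.1, s.1)]

-- ===== PORT B =====
-- length of the run of chars satisfying p: ports Source B's "while j < n and <test>(roman[j]): j += 1" scans
def scanLen (p : Char → Bool) : List Char → Nat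
  | [] => 0
  | c :: rest => if p c then scanLen p rest + 1 else 0

-- Source B's outer while-loop: i is the start of the current piece, out the pieces so far.
-- roman[i:j] is ported as (l.take j).drop i (exact for 0 ≤ i ≤ j ≤ len).
-- The stop test "k == n" is ported as "n ≤ k" (equivalent on every reachable state, since k ≤ n
-- always holds there; ≤ only makes termination provable for arbitrary i).
def altGo (l : List Char) (i : Nat) (out : List (String × Int)) : List (String × Int) :=
  let j := i + scanLen (fun c => c != '*') (l.drop i)
  let k := j + scanLen (fun c => c == '*') (l.drop j)
  let out' := out ++ [(String.mk ((l.take j).drop i), (k : Int) - (j : Int))]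
  if l.length ≤ k then out' else altGo l k out'
termination_by l.length - i
decreasing_by
  rename_i h
  simp only [not_le] at h
  have hik : i < i + scanLen (fun c => c != '*') (l.drop i)
      + scanLen (fun c => c == '*')
          (l.drop (i + scanLen (fun c => c != '*') (l.drop i))) := by
    by_contra hcon
    push_neg at hcon
    have h1 : scanLen (fun c => c != '*') (l.drop i) = 0 := by omega
    have h2 : scanLen (fun c => c == '*')
        (l.drop (i + scanLen (fun c => c != '*') (l.drop i))) = 0 := by omega
    rw [h1] at h2
    simp only [Nat.add_zero] at h2
    have hlen : i < l.length := by omega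
    have hne : l.drop i ≠ [] := by
      intro hnil
      have := List.length_drop (l := l) (i := i)
      rw [hnil] at this
      simp at this
      omega
    obtain ⟨c, t, hct⟩ := List.exists_cons_of_ne_nil hne
    rw [hct] at h1 h2
    simp only [scanLen] at h1 h2
    by_cases hc : c = '*'
    · simp [hc] at h2
    · simp [hc] at h1
  omega

def to_components_alt (roman : String) : List (String × Int) :=
  altGo roman.toList 0 []

-- ===== PRECONDITION & SPEC =====
def Spec_to_components (roman : String) (out : List (String × Int)) : Prop := out = to_components_alt roman
instance (roman : String) (out : List (String × Int)) : Decidable (Spec_to_components roman out) := by unfold Spec_to_components; infer_instance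

-- ===== CLAIM (what is proved, stated in full; the proofs are below) =====
def Claim_equal_to_components : Prop := ∀ (roman : String), Dom_to_components roman → Spec_to_components roman (to_components roman)

-- ===== LEMMAS AND PROOFS =====

-- slice-based reformulation of altGo (proof helper, not a port)
def altGo0 (rest : List Char) (out : List (String × Int)) : List (String × Int) :=
  let j := scanLen (fun c => c != '*') rest
  let k := j + scanLen (fun c => c == '*') (rest.drop j)
  let out' := out ++ [(String.mk (rest.take j), (k : Int) - (j : Int))]
  if rest.length ≤ k then out' else altGo0 (rest.drop k) out'
termination_by rest.length
decreasing_by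
  rename_i h
  simp only [not_le] at h
  simp only [List.length_drop]
  have hk : 0 < scanLen (fun c => c != '*') rest
      + scanLen (fun c => c == '*') (rest.drop (scanLen (fun c => c != '*') rest)) := by
    by_contra hcon
    have h1 : scanLen (fun c => c != '*') rest = 0 := by omega
    have h2 : scanLen (fun c => c == '*') (rest.drop (scanLen (fun c => c != '*') rest)) = 0 := by
      omega
    rw [h1] at h2
    simp only [List.drop_zero] at h2
    have hne : rest ≠ [] := by
      intro hnil
      rw [hnil] at h
      simp [scanLen] at h
    obtain ⟨c, t, hct⟩ := List.exists_cons_of_ne_nil hne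
    rw [hct] at h1 h2
    simp only [scanLen] at h1 h2
    by_cases hcc : c = '*'
    · simp [hcc] at h2
    · simp [hcc] at h1
  omega

lemma scanLen_le (p : Char → Bool) (l : List Char) : scanLen p l ≤ l.length := by
  induction l with
  | nil => simp [scanLen]
  | cons c rest ih => simp only [scanLen, List.length_cons]; split <;> omega

lemma scanLen_append_all {p : Char → Bool} {A : List Char} (h : ∀ c ∈ A, p c = true) :
    ∀ rest, scanLen p (A ++ rest) = A.length + scanLen p rest := by
  induction A with
  | nil => intro rest; simp
  | cons a A ih =>
    intro rest
    have ha : p a = true := h a (by simp)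
    simp only [List.cons_append, scanLen, ha, if_true, List.length_cons]
    rw [ih (fun c hc => h c (by simp [hc]))]
    omega

lemma scanLen_ne_replicate (m : Nat) :
    scanLen (fun c => c != '*') (List.replicate m '*') = 0 := by
  cases m <;> simp [scanLen, List.replicate_succ]

lemma scanLen_star_replicate (m : Nat) : ∀ rest,
    scanLen (fun c => c == '*') (List.replicate m '*' ++ rest)
      = m + scanLen (fun c => c == '*') rest := by
  intro rest
  rw [scanLen_append_all (by intro c hc; simp_all [List.eq_of_mem_replicate hc])]
  simp

lemma scanLen_star_repl (m : Nat) :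
    scanLen (fun c => c == '*') (List.replicate m '*') = m := by
  induction m with
  | zero => simp [scanLen]
  | succ m ih => simp [List.replicate_succ, scanLen, ih]

lemma scanLen_star_cons {c : Char} (hc : c ≠ '*') (R : List Char) :
    scanLen (fun c => c == '*') (c :: R) = 0 := by
  simp [scanLen, hc]

lemma scanLen_letters {A : List Char} (hA : ∀ c ∈ A, c ≠ '*') :
    ∀ rest, scanLen (fun c => c != '*') (A ++ rest)
      = A.length + scanLen (fun c => c != '*') rest :=
  scanLen_append_all (by intro c hc; simpa using hA c hc)

lemma altGo_shift (N : Nat) : ∀ (l : List Char) (i : Nat) (out : List (String × Int)),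
    l.length - i ≤ N → i ≤ l.length → altGo l i out = altGo0 (l.drop i) out := by
  induction N with
  | zero =>
    intro l i out h hi
    have hil : i = l.length := by omega
    subst hil
    rw [altGo, altGo0]
    simp [scanLen, List.drop_length, List.take_length]
  | succ N ih =>
    intro l i out h hi
    rw [altGo, altGo0]
    set s1 := scanLen (fun c => c != '*') (l.drop i) with hs1
    have hdj : l.drop (i + s1) = (l.drop i).drop s1 := by
      rw [List.drop_drop]
    set s2 := scanLen (fun c => c == '*') ((l.drop i).drop s1) with hs2
    have hs1le : s1 ≤ (l.drop i).length := scanLen_le _ _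
    have hs2le : s2 ≤ ((l.drop i).drop s1).length := scanLen_le _ _
    clear_value s1 s2
    simp only [hdj]
    rw [← hs2]
    have htake : (l.take (i + s1)).drop i = (l.drop i).take s1 := by
      rw [List.drop_take]
      congr 1
      omega
    have hcond : (l.length ≤ i + s1 + s2) ↔ ((l.drop i).length ≤ s1 + s2) := by
      simp only [List.length_drop]
      omega
    have hint : ((i + s1 + s2 : Nat) : Int) - ((i + s1 : Nat) : Int)
        = ((s1 + s2 : Nat) : Int) - ((s1 : Nat) : Int) := by push_cast; ring
    by_cases hc : l.length ≤ i + s1 + s2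
    · rw [if_pos hc, if_pos (hcond.mp hc), htake, hint]
    · rw [if_neg hc, if_neg (fun hh => hc (hcond.mpr hh)), htake, hint]
      have hik : i < i + s1 + s2 := by
        by_contra hcon
        have e1 : scanLen (fun c => c != '*') (l.drop i) = 0 := by rw [← hs1]; omega
        have e2 : scanLen (fun c => c == '*') ((l.drop i).drop s1) = 0 := by rw [← hs2]; omega
        have hs10 : s1 = 0 := by omega
        rw [hs10, List.drop_zero] at e2
        have hne : l.drop i ≠ [] := by
          intro hnil
          have : l.length - i = 0 := by simpa using congrArg List.length hnil
          omega
        obtain ⟨c, t, hct⟩ := List.exists_cons_of_ne_nil hne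
        rw [hct] at e1 e2
        simp only [scanLen] at e1 e2
        by_cases hcc : c = '*'
        · simp [hcc] at e2
        · simp [hcc] at e1
      have hrec := ih l (i + s1 + s2) (out ++ [(String.mk ((l.drop i).take s1),
          ((s1 + s2 : Nat) : Int) - ((s1 : Nat) : Int))]) (by omega) (by omega)
      rw [hrec, List.drop_drop, Nat.add_assoc]

lemma aFold_ns (l : List Char) : ∀ (o : Int) (n : List Char) (ns : List (String × Int)),
    l.foldl toCompStep (o, n, ns) =
      ((l.foldl toCompStep (o, n, [])).1, (l.foldl toCompStep (o, n, [])).2.1,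
        ns ++ (l.foldl toCompStep (o, n, [])).2.2) := by
  induction l with
  | nil => intro o n ns; simp
  | cons c rest ih =>
    intro o n ns
    simp only [List.foldl_cons]
    by_cases hc : c = '*'
    · have hstep : ∀ ns' : List (String × Int), toCompStep (o, n, ns') c = (o + 1, n, ns') := by
        intro ns'; simp [toCompStep, hc]
      rw [hstep, hstep, ih (o + 1) n ns]
    · by_cases ho : o > 0
      · have hstep : ∀ ns' : List (String × Int),
            toCompStep (o, n, ns') c = (0, [c], ns' ++ [(String.mk n, o)]) := by
          intro ns'; simp [toCompStep, hc, ho]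
        rw [hstep, hstep]
        rw [ih 0 [c] (ns ++ [(String.mk n, o)]), ih 0 [c] ([] ++ [(String.mk n, o)])]
        simp
      · have hstep : ∀ ns' : List (String × Int),
            toCompStep (o, n, ns') c = (o, n ++ [c], ns') := by
          intro ns'; simp [toCompStep, hc, ho]
        rw [hstep, hstep, ih o (n ++ [c]) ns]

lemma aFold_letters (A : List Char) : ∀ (n : List Char) (ns : List (String × Int)),
    (∀ c ∈ A, c ≠ '*') → A.foldl toCompStep (0, n, ns) = (0, n ++ A, ns) := by
  induction A with
  | nil => intro n ns _; simp
  | cons a A ih =>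
    intro n ns h
    have ha : a ≠ '*' := h a (by simp)
    simp only [List.foldl_cons]
    have hstep : toCompStep (0, n, ns) a = (0, n ++ [a], ns) := by
      simp [toCompStep, ha]
    rw [hstep, ih (n ++ [a]) ns (fun c hc => h c (by simp [hc]))]
    simp

lemma aFold_stars (m : Nat) : ∀ (o : Int) (n : List Char) (ns : List (String × Int)),
    (List.replicate m '*').foldl toCompStep (o, n, ns) = (o + m, n, ns) := by
  induction m with
  | zero => intro o n ns; simp
  | succ m ih =>
    intro o n ns
    simp only [List.replicate_succ, List.foldl_cons]
    have hstep : toCompStep (o, n, ns) '*' = (o + 1, n, ns) := by simp [toCompStep]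
    rw [hstep, ih]
    simp only [Prod.mk.injEq]
    exact ⟨by push_cast; ring, trivial⟩

lemma altGo0_last {A : List Char} (m : Nat) (out : List (String × Int))
    (hA : ∀ c ∈ A, c ≠ '*') :
    altGo0 (A ++ List.replicate m '*') out = out ++ [(String.mk A, (m : Int))] := by
  rw [altGo0]
  have h1 : scanLen (fun c => c != '*') (A ++ List.replicate m '*') = A.length := by
    rw [scanLen_letters hA, scanLen_ne_replicate]
    omega
  simp only [h1, List.drop_left, List.take_left, scanLen_star_repl,
    List.length_append, List.length_replicate]
  rw [if_pos le_rfl]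
  have hi : ((A.length + m : Nat) : Int) - ((A.length : Nat) : Int) = (m : Int) := by
    push_cast; ring
  rw [hi]

lemma altGo0_piece {A : List Char} (m : Nat) (c : Char) (R : List Char)
    (out : List (String × Int))
    (hA : ∀ c ∈ A, c ≠ '*') (hc : c ≠ '*') (hm : 1 ≤ m) :
    altGo0 ((A ++ List.replicate m '*') ++ c :: R) out
      = altGo0 (c :: R) (out ++ [(String.mk A, (m : Int))]) := by
  rw [altGo0]
  have h1 : scanLen (fun c => c != '*') ((A ++ List.replicate m '*') ++ c :: R)
      = A.length := by
    rw [List.append_assoc, scanLen_letters hA]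
    obtain ⟨m', rfl⟩ : ∃ m', m = m' + 1 := ⟨m - 1, by omega⟩
    simp [List.replicate_succ, scanLen]
  have h2 : ((A ++ List.replicate m '*') ++ c :: R).drop A.length
      = List.replicate m '*' ++ c :: R := by
    rw [List.append_assoc, List.drop_left]
  have h3 : ((A ++ List.replicate m '*') ++ c :: R).take A.length = A := by
    rw [List.append_assoc, List.take_left]
  simp only [h1, h2, h3, scanLen_star_replicate, scanLen_star_cons hc, Nat.add_zero]
  rw [if_neg (by simp)]
  have h4 : ((A ++ List.replicate m '*') ++ c :: R).drop (A.length + m) = c :: R := by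
    rw [show A.length + m = (A ++ List.replicate m '*').length by simp, List.drop_left]
  rw [h4]
  have hi : ((A.length + m : Nat) : Int) - ((A.length : Nat) : Int) = (m : Int) := by
    push_cast; ring
  rw [hi]

lemma decomp (l : List Char) : ∃ A m R, l = A ++ List.replicate m '*' ++ R ∧
    (∀ c ∈ A, c ≠ '*') ∧ (R = [] ∨ ∃ c R', R = c :: R' ∧ c ≠ '*' ∧ 1 ≤ m) := by
  induction l with
  | nil => exact ⟨[], 0, [], by simp, by simp, Or.inl rfl⟩
  | cons c l ih =>
    obtain ⟨A, m, R, hl, hA, hR⟩ := ih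
    by_cases hc : c = '*'
    · cases A with
      | nil =>
        refine ⟨[], m + 1, R, ?_, by simp, ?_⟩
        · subst hc; simp only [hl]; simp [List.replicate_succ]
        · rcases hR with h | ⟨d, R', h1, h2, _⟩
          · exact Or.inl h
          · exact Or.inr ⟨d, R', h1, h2, by omega⟩
      | cons a A' =>
        refine ⟨[], 1, a :: A' ++ List.replicate m '*' ++ R, ?_, by simp, ?_⟩
        · subst hc; simp [hl, List.replicate_succ]
        · exact Or.inr ⟨a, A' ++ List.replicate m '*' ++ R, by simp, hA a (by simp), le_rfl⟩
    · rcases hR with rfl | hcons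
      · refine ⟨c :: A, m, [], by simp [hl], ?_, Or.inl rfl⟩
        intro x hx
        rcases List.mem_cons.mp hx with rfl | hx
        · exact hc
        · exact hA x hx
      · refine ⟨c :: A, m, R, by simp [hl], ?_, Or.inr hcons⟩
        intro x hx
        rcases List.mem_cons.mp hx with rfl | hx
        · exact hc
        · exact hA x hx

lemma main_equiv (N : Nat) : ∀ (l n : List Char) (out : List (String × Int)),
    l.length ≤ N → (∀ c ∈ n, c ≠ '*') →
    out ++ ((l.foldl toCompStep (0, n, [])).2.2
        ++ [(String.mk (l.foldl toCompStep (0, n, [])).2.1, (l.foldl toCompStep (0, n, [])).1)])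
      = altGo0 (n ++ l) out := by
  induction N with
  | zero =>
    intro l n out h hn
    have hl : l = [] := List.eq_nil_of_length_eq_zero (by omega)
    subst hl
    have := altGo0_last (A := n) 0 out hn
    simp only [List.replicate_zero, List.append_nil] at this
    simp [this]
  | succ N ih =>
    intro l n out h hn
    obtain ⟨A, m, R, rfl, hA, hR⟩ := decomp l
    have hAn : ∀ c ∈ n ++ A, c ≠ '*' := by
      intro x hx
      rcases List.mem_append.mp hx with hx | hx
      · exact hn x hx
      · exact hA x hx
    rcases hR with rfl | ⟨c, R', rfl, hc, hm⟩
    · -- final piece: l = A ++ replicate m '*'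
      simp only [List.append_nil, List.foldl_append]
      rw [aFold_letters A n [] hA, aFold_stars m 0 (n ++ A) []]
      have hlast := altGo0_last (A := n ++ A) m out hAn
      rw [show n ++ (A ++ List.replicate m '*') = (n ++ A) ++ List.replicate m '*' from
        (List.append_assoc n A (List.replicate m '*')).symm, hlast]
      simp
    · -- piece followed by more: l = A ++ replicate m '*' ++ c :: R'
      simp only [List.foldl_append, List.foldl_cons]
      rw [aFold_letters A n [] hA, aFold_stars m 0 (n ++ A) []]
      have hstep : toCompStep (0 + (m : Int), n ++ A, []) c
          = (0, [c], [] ++ [(String.mk (n ++ A), 0 + (m : Int))]) := by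
        simp [toCompStep, hc]
        omega
      rw [hstep]
      simp only [List.nil_append]
      rw [aFold_ns R' 0 [c] [(String.mk (n ++ A), 0 + (m : Int))]]
      have hlen : R'.length ≤ N := by
        simp only [List.length_append, List.length_replicate, List.length_cons] at h
        omega
      have hrec := ih R' [c] (out ++ [(String.mk (n ++ A), 0 + (m : Int))]) hlen
        (by intro x hx; simp at hx; subst hx; exact hc)
      simp only [List.singleton_append] at hrec
      have hpiece := altGo0_piece (A := n ++ A) m c R' out hAn hc hm
      have hassoc : n ++ (A ++ List.replicate m '*' ++ c :: R')
          = ((n ++ A) ++ List.replicate m '*') ++ c :: R' := by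
        simp [List.append_assoc]
      rw [hassoc, hpiece]
      have hmz : (0 : Int) + (m : Int) = (m : Int) := by ring
      rw [hmz] at hrec ⊢
      rw [← hrec]
      simp

-- ===== VERDICT (by name: the statement is the Claim_ definition above) =====
theorem to_components_spec : Claim_equal_to_components := by
  intro roman _
  unfold Spec_to_components to_components to_components_alt
  rw [altGo_shift roman.toList.length roman.toList 0 [] (by omega) (by omega)]
  simpa using main_equiv roman.toList.length roman.toList [] [] le_rfl (by simp)
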